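-- pv_equiv track=rewrite | github.com/viktorpomytkin/test_task | task_1.py | circular_path
-- ===== SOURCE A (Python) =====
-- def circular_path(n, m):
--     arr = list(range(1, n + 1))
--     path = []
--     idx = 0
--     first = True
--     while first or arr[idx] != 1:
--         first = False
--         path.append(arr[idx])
--         idx = (idx + m - 1) % n
--     return ''.join(map(str, path))
-- ===== SOURCE B (Python) =====
-- def circular_path(n, m):
--     arr = list(range(1, n + 1))
--     start = arr[0]
--     step = (m - 1) % n
--     a, b = n, step
--     while b:
--         a, b = b, a % b
--     length = n // a
--     return str(start) + ''.join(str((k * step) % n + 1) for k in range(1, length))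
-- ===== Notes on version B (the rewrite author's own statement) =====
-- stated objective: faster
-- what changed: B replaces A's step-until-the-start-returns walk over the circle by a closed-form cycle length n // gcd(n, (m-1) % n) computed with Euclid's algorithm, emitting the visited numbers directly as the arithmetic progression (k*(m-1)) % n + 1.
import Mathlib
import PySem

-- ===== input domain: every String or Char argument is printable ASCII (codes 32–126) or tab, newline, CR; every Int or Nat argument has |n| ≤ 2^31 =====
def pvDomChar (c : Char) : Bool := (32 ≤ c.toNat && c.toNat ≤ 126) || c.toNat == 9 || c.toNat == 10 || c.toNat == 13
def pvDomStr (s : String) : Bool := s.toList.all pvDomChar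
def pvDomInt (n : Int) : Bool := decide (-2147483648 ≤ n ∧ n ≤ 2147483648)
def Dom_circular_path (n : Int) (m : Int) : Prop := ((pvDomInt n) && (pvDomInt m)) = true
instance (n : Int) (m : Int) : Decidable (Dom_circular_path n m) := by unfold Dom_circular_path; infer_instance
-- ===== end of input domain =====

-- B replaces A's step-until-return walk by a closed-form cycle length n / gcd(n, (m-1) % n)
-- and emits the visited numbers as an arithmetic progression mod n (alternative algorithm).

-- ===== PORT A =====
-- the while loop of A; fuel only makes it total (inside Pre_ the loop runs at most n times)
def cpLoop (arr : List Int) (n : Int) (m : Int) :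
    Nat → Int → Bool → List Int → List Int
  | 0, _, _, path => path
  | fuel+1, idx, first, path =>
    match PySem.List.pyGet? arr idx with
    | none => path          -- IndexError in Python: outside Pre_
    | some v =>
      if first || v ≠ 1 then
        cpLoop arr n m fuel (PySem.Int.mod (idx + m - 1) n) false (path ++ [v])
      else path

def circular_path (n : Int) (m : Int) : String :=
  let arr := PySem.List.pyRange 1 (n + 1) 1
  let path := cpLoop arr n m (arr.length + 1) 0 true []
  PySem.Str.join "" (path.map PySem.Int.toStr)

-- ===== PORT B =====
-- the hand-written Euclid loop of Source B; fuel only makes it total (b strictly decreases)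
def cpGcd : Nat → Int → Int → Int
  | 0, a, _ => a
  | fuel+1, a, b => if b ≠ 0 then cpGcd fuel b (PySem.Int.mod a b) else a

def circular_path_alt (n : Int) (m : Int) : String :=
  let arr := PySem.List.pyRange 1 (n + 1) 1
  match PySem.List.pyGet? arr 0 with
  | none => ""              -- IndexError in Python: outside Pre_
  | some start =>
    let step := PySem.Int.mod (m - 1) n
    let a := cpGcd (step.toNat + 1) n step
    let len := PySem.Int.floordiv n a
    PySem.Int.toStr start ++
      PySem.Str.join ""
        ((PySem.List.pyRange 1 len 1).map
          (fun k => PySem.Int.toStr (PySem.Int.mod (k * step) n + 1)))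

-- ===== PRECONDITION & SPEC =====
-- A raises IndexError for n ≤ 0 (arr is empty, arr[0] fails); Pre_ admits exactly n ≥ 1.
def Pre_circular_path (n : Int) (m : Int) : Prop := 1 ≤ n
instance (n : Int) (m : Int) : Decidable (Pre_circular_path n m) := by
  unfold Pre_circular_path; infer_instance

def pvWitness_circular_path : Int × Int := (5, 3)

def Spec_circular_path (n : Int) (m : Int) (out : String) : Prop := out = circular_path_alt n m
instance (n : Int) (m : Int) (out : String) : Decidable (Spec_circular_path n m out) := by
  unfold Spec_circular_path; infer_instance

-- ===== CLAIM (what is proved, stated in full; the proofs are below) =====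
def Claim_equal_circular_path : Prop :=
  ∀ (n : Int) (m : Int), Dom_circular_path n m → Pre_circular_path n m →
    Spec_circular_path n m (circular_path n m)

-- ===== LEMMAS AND PROOFS =====

-- arr = [1, …, n]; indexing it inside range yields i+1
theorem cp_arr_get (n i : Int) (h0 : 0 ≤ i) (h1 : i < n) :
    PySem.List.pyGet? (PySem.List.pyRange 1 (n + 1) 1) i = some (i + 1) := by
  rw [PySem.List.pyRange_one, PySem.List.pyGet?_of_nonneg _ h0]
  have hlt : i.toNat < (n + 1 - 1).toNat := by omega
  rw [List.getElem?_map, List.getElem?_range hlt]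
  simp
  omega

theorem cp_flatten_intersperse (l : List (List Char)) :
    (List.intersperse ([] : List Char) l).flatten = l.flatten := by
  induction l with
  | nil => simp
  | cons a t ih =>
    cases t with
    | nil => simp
    | cons b t2 => simp_all [List.intersperse]

theorem cp_join_eq (l : List String) :
    PySem.Str.join "" l = String.ofList (l.map String.toList).flatten := by
  simp [PySem.Str.join, PySem.Chars.join, List.intercalate, cp_flatten_intersperse]

-- ''.join peels off its head
theorem cp_join_cons (a : String) (l : List String) :
    PySem.Str.join "" (a :: l) = a ++ PySem.Str.join "" l := by
  rw [cp_join_eq, cp_join_eq, List.map_cons, List.flatten_cons, String.ofList_append,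
    String.ofList_toList]

theorem cp_next (n m : Int) (hn : 0 < n) (j : Int) :
    PySem.Int.mod ((j * PySem.Int.mod (m - 1) n) % n + m - 1) n
      = ((j + 1) * PySem.Int.mod (m - 1) n) % n := by
  rw [PySem.Int.mod_eq_emod_of_pos hn, PySem.Int.mod_eq_emod_of_pos hn]
  conv_lhs => rw [show j * ((m-1) % n) % n + m - 1 = j * ((m-1) % n) % n + (m - 1) by ring]
  rw [Int.add_emod, Int.emod_emod_of_dvd _ dvd_rfl, ← Int.emod_emod_of_dvd (m-1) dvd_rfl,
    ← Int.add_emod]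
  ring_nf
  rw [Int.emod_emod_of_dvd (-1+m) dvd_rfl]

theorem cpLoop_spec (n m : Int) (hn : 0 < n) (L : Nat)
    (hdvd : n ∣ (L : Int) * PySem.Int.mod (m - 1) n)
    (hmin : ∀ j : Nat, 0 < j → j < L → ¬ n ∣ (j : Int) * PySem.Int.mod (m - 1) n) :
    ∀ (fuel j : Nat) (acc : List Int), 0 < j → j ≤ L → L - j < fuel →
      cpLoop (PySem.List.pyRange 1 (n + 1) 1) n m fuel
          (((j : Int) * PySem.Int.mod (m - 1) n) % n) false acc
        = acc ++ (List.range (L - j)).map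
            (fun k => ((((j + k : Nat) : Int) * PySem.Int.mod (m - 1) n) % n) + 1) := by
  intro fuel
  induction fuel with
  | zero => intro j acc _ _ h; omega
  | succ f ih =>
    intro j acc hj hjL hf
    have hs0 : 0 ≤ PySem.Int.mod (m - 1) n := PySem.Int.mod_nonneg _ hn
    set s := PySem.Int.mod (m - 1) n with hs
    have hidx0 : 0 ≤ ((j : Int) * s) % n := Int.emod_nonneg _ (by omega)
    have hidx1 : ((j : Int) * s) % n < n := Int.emod_lt_of_pos _ hn
    simp only [cpLoop, cp_arr_get n _ hidx0 hidx1]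
    by_cases hjeq : j = L
    · have hz : ((j : Int) * s) % n = 0 := by
        subst hjeq; exact Int.emod_eq_zero_of_dvd hdvd
      simp [hz]
      omega
    · have hjlt : j < L := lt_of_le_of_ne hjL hjeq
      have hnz : ((j : Int) * s) % n ≠ 0 := by
        intro hz
        exact hmin j hj hjlt (Int.dvd_of_emod_eq_zero hz)
      have hcond : (false || (((j:Int) * s) % n + 1) ≠ 1) = true := by
        simp; omega
      rw [if_pos (by simpa using hcond)]
      rw [cp_next n m hn ((j:Int))]
      have : ((j:Int) + 1) = ((j+1 : Nat) : Int) := by push_cast; ring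
      rw [this]
      rw [ih (j+1) (acc ++ [((j:Int)*s) % n + 1]) (by omega) (by omega) (by omega)]
      rw [List.append_assoc]
      congr 1
      have hd : L - j = (L - (j+1)) + 1 := by omega
      rw [hd, List.range_succ_eq_map, List.map_cons, List.map_map]
      simp only [Nat.add_zero, List.singleton_append]
      refine congrArg₂ List.cons (by norm_num) ?_
      refine congrArg₂ List.map ?_ rfl
      funext k
      simp only [Function.comp_apply, Nat.succ_eq_add_one]
      congr 3
      omega

theorem cp_gcd_emod (a b : Int) : Int.gcd b (a % b) = Int.gcd a b := by
  rw [Int.emod_def, mul_comm b (a/b), Int.gcd_sub_mul_right_right b a (a/b)]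
  exact Int.gcd_comm b a

theorem cpGcd_eq (fuel : Nat) (a b : Int) (ha : 0 < a) (hb : 0 ≤ b) (hf : b < (fuel : Int)) :
    cpGcd fuel a b = (Int.gcd a b : Int) := by
  induction fuel generalizing a b with
  | zero => omega
  | succ f ih =>
    by_cases h : b = 0
    · simp [cpGcd, h, Int.natAbs_of_nonneg ha.le]
    · have hb' : 0 < b := lt_of_le_of_ne hb (Ne.symm h)
      rw [show cpGcd (f+1) a b = cpGcd f b (PySem.Int.mod a b) by simp [cpGcd, h]]
      rw [PySem.Int.mod_eq_emod_of_pos hb']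
      rw [ih b (a % b) hb' (Int.emod_nonneg a h) (by have := Int.emod_lt_of_pos a hb'; omega)]
      rw [cp_gcd_emod]

theorem cp_minimal (N sN : Nat) (hN : 0 < N) :
    ∀ j : Nat, 0 < j → j < N / Nat.gcd N sN → ¬ N ∣ j * sN := by
  intro j hj hjL hdvd
  have hg : 0 < Nat.gcd N sN := Nat.gcd_pos_of_pos_left sN hN
  have hcop := Nat.coprime_div_gcd_div_gcd (m := N) (n := sN) hg
  obtain ⟨c, hc⟩ := hdvd
  have h1 : j * (sN / Nat.gcd N sN) = (N / Nat.gcd N sN) * c := by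
    apply Nat.eq_of_mul_eq_mul_left hg
    calc Nat.gcd N sN * (j * (sN / Nat.gcd N sN))
        = j * (Nat.gcd N sN * (sN / Nat.gcd N sN)) := by ring
      _ = j * sN := by rw [Nat.mul_div_cancel' (Nat.gcd_dvd_right N sN)]
      _ = N * c := hc
      _ = (Nat.gcd N sN * (N / Nat.gcd N sN)) * c := by
            rw [Nat.mul_div_cancel' (Nat.gcd_dvd_left N sN)]
      _ = Nat.gcd N sN * ((N / Nat.gcd N sN) * c) := by ring
  have hdvd' : (N / Nat.gcd N sN) ∣ j := by
    exact hcop.dvd_of_dvd_mul_right ⟨c, by rw [mul_comm] at h1 ⊢; omega⟩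
  have := Nat.le_of_dvd hj hdvd'
  omega

theorem cp_period (N sN : Nat) : N ∣ (N / Nat.gcd N sN) * sN := by
  refine ⟨sN / Nat.gcd N sN, ?_⟩
  calc (N / Nat.gcd N sN) * sN
      = (N / Nat.gcd N sN) * (Nat.gcd N sN * (sN / Nat.gcd N sN)) := by
        rw [Nat.mul_div_cancel' (Nat.gcd_dvd_right N sN)]
    _ = ((N / Nat.gcd N sN) * Nat.gcd N sN) * (sN / Nat.gcd N sN) := by ring
    _ = N * (sN / Nat.gcd N sN) := by rw [Nat.div_mul_cancel (Nat.gcd_dvd_left N sN)]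

theorem main_eq (n m : Int) (hn : 1 ≤ n) : circular_path n m = circular_path_alt n m := by
  have hn0 : 0 < n := hn
  set s := PySem.Int.mod (m - 1) n with hsdef
  have hs0 : 0 ≤ s := PySem.Int.mod_nonneg _ hn0
  have hs1 : s < n := PySem.Int.mod_lt _ hn0
  set N := n.toNat with hNdef
  set sN := s.toNat with hsNdef
  have hNc : (N : Int) = n := Int.toNat_of_nonneg (by omega)
  have hsc : (sN : Int) = s := Int.toNat_of_nonneg hs0
  have hN0 : 0 < N := by omega
  set g := Nat.gcd N sN with hgdef
  have hg : 0 < g := Nat.gcd_pos_of_pos_left sN hN0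
  set L := N / g with hLdef
  have hL1 : 1 ≤ L := Nat.div_pos (Nat.le_of_dvd hN0 (Nat.gcd_dvd_left N sN)) hg
  have hLN : L ≤ N := Nat.div_le_self N g
  -- divisibility facts, cast to Int
  have hdvdI : n ∣ (L : Int) * s := by
    have := cp_period N sN
    rw [← hNc, ← hsc]
    exact_mod_cast Int.natCast_dvd_natCast.mpr this
  have hminI : ∀ j : Nat, 0 < j → j < L → ¬ n ∣ (j : Int) * s := by
    intro j hj hjL hd
    refine cp_minimal N sN hN0 j hj hjL ?_
    have : (N : Int) ∣ (j : Int) * (sN : Int) := by rw [hNc, hsc]; exact hd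
    exact_mod_cast this
  -- the gcd computed by B
  have hgcd : cpGcd (s.toNat + 1) n s = (g : Int) := by
    rw [cpGcd_eq _ n s hn0 hs0 (by push_cast; omega)]
    congr 1
    rw [Int.gcd]
    congr 1 <;> omega
  -- arr and its length
  have harrlen : (PySem.List.pyRange 1 (n + 1) 1).length = N := by
    rw [PySem.List.length_pyRange_one]; omega
  -- B's len
  have hlen : PySem.Int.floordiv n (g : Int) = (L : Int) := by
    rw [PySem.Int.floordiv_eq_ediv_of_pos (by exact_mod_cast hg)]
    rw [← hNc]
    rw [← Int.natCast_div]
  -- evaluate A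
  have hstep1 : cpLoop (PySem.List.pyRange 1 (n + 1) 1) n m (N + 1) 0 true []
      = cpLoop (PySem.List.pyRange 1 (n + 1) 1) n m N (PySem.Int.mod (0 + m - 1) n) false [1] := by
    simp [cpLoop, cp_arr_get n 0 le_rfl hn0]
  have hmod01 : PySem.Int.mod (0 + m - 1) n = ((1 : Nat) : Int) * s % n := by
    rw [show (0 + m - 1) = m - 1 by ring, ← hsdef]
    push_cast
    rw [one_mul, Int.emod_eq_of_lt hs0 hs1]
  have hA : circular_path n m
      = PySem.Str.join "" (([1] ++ (List.range (L - 1)).map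
          (fun k => ((((1 + k : Nat) : Int) * s) % n) + 1)).map PySem.Int.toStr) := by
    show PySem.Str.join "" ((cpLoop (PySem.List.pyRange 1 (n+1) 1) n m
        ((PySem.List.pyRange 1 (n+1) 1).length + 1) 0 true []).map PySem.Int.toStr) = _
    rw [harrlen, hstep1, hmod01,
      cpLoop_spec n m hn0 L hdvdI hminI N 1 [1] (by omega) hL1 (by omega)]
  -- evaluate B
  have hB : circular_path_alt n m
      = PySem.Int.toStr 1 ++ PySem.Str.join ""
          ((PySem.List.pyRange 1 (L : Int) 1).map
            (fun k => PySem.Int.toStr (PySem.Int.mod (k * s) n + 1))) := by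
    show (match PySem.List.pyGet? (PySem.List.pyRange 1 (n+1) 1) 0 with
      | none => ""
      | some start =>
        PySem.Int.toStr start ++
          PySem.Str.join ""
            ((PySem.List.pyRange 1 (PySem.Int.floordiv n (cpGcd ((PySem.Int.mod (m-1) n).toNat + 1) n (PySem.Int.mod (m-1) n))) 1).map
              (fun k => PySem.Int.toStr (PySem.Int.mod (k * PySem.Int.mod (m-1) n) n + 1)))) = _
    rw [cp_arr_get n 0 le_rfl hn0, ← hsdef, hgcd, hlen]
    simp only [zero_add]
  have hlist : (PySem.List.pyRange 1 (L : Int) 1).map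
        (fun k => PySem.Int.toStr (PySem.Int.mod (k * s) n + 1))
      = (List.range (L - 1)).map
        (fun k => PySem.Int.toStr ((((1 + k : Nat) : Int) * s) % n + 1)) := by
    apply List.ext_getElem
    · rw [List.length_map, PySem.List.length_pyRange_one, List.length_map, List.length_range]
      omega
    · intro i h1 h2
      simp only [List.getElem_map, PySem.List.getElem_pyRange_one, List.getElem_range]
      rw [PySem.Int.mod_eq_emod_of_pos hn0]
      push_cast
      ring_nf
  rw [hA, hB, hlist]
  simp only [List.map_cons, List.singleton_append, cp_join_cons, List.map_map]
  rfl


-- ===== VERDICT (by name: the statement is the Claim_ definition above) =====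
theorem circular_path_spec : Claim_equal_circular_path := by
  intro n m _ hpre
  show circular_path n m = circular_path_alt n m
  exact main_eq n m hpre
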